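-- pv_equiv track=rewrite | github.com/Norukung/forloob | # นำเข้าโมดูล.py | calculate_sequence
-- ===== SOURCE A (Python) =====
-- def calculate_sequence(sequence_type):
--     if sequence_type == 1:
--         # ลำดับเลขคู่
--         result = [2 * i + 1 for i in range(8)]
--     elif sequence_type == 2:
--         # ลำดับเลขคี่ที่เพิ่มขึ้นทีละ 3
--         result = [2 + 3 * i for i in range(6)]
--     elif sequence_type == 3:
--         # ลำดับเลขลดลงทีละ 10
--         result = [30 - 10 * i for i in range(7)]
--     elif sequence_type == 4:
--         # ลำดับเลขเพิ่มขึ้นทีละ 8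
--         result = [15 + 8 * i for i in range(6)]
--     else:
--         result = []
--
--     return result
-- ===== SOURCE B (Python) =====
-- _TABLE = {
--     1: [1, 3, 5, 7, 9, 11, 13, 15],
--     2: [2, 5, 8, 11, 14, 17],
--     3: [30, 20, 10, 0, -10, -20, -30],
--     4: [15, 23, 31, 39, 47, 55],
-- }
--
--
-- def calculate_sequence(sequence_type):
--     return list(_TABLE.get(sequence_type, []))
-- ===== Notes on version B (the rewrite author's own statement) =====
-- stated objective: idiomatic
-- what changed: Replaces the if/elif chain of range comprehensions with a single dict lookup of precomputed literal lists (copied on return).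
import Mathlib
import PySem

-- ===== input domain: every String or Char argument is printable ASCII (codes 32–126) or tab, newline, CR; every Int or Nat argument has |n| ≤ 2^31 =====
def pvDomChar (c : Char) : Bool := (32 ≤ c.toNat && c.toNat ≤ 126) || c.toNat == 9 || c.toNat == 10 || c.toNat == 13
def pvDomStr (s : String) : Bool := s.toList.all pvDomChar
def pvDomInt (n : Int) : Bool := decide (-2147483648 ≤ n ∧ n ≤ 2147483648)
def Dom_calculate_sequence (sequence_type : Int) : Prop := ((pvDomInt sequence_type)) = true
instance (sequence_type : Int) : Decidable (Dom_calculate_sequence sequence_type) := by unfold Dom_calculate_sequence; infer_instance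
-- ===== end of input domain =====

-- ===== PORT A =====
-- B changes dispatch: one dict lookup of literal lists instead of the if/elif chain; objective: idiomatic.
def calculate_sequence (sequence_type : Int) : List Int :=
  if sequence_type == 1 then
    (PySem.List.pyRange 0 8 1).map (fun i => 2 * i + 1)
  else if sequence_type == 2 then
    (PySem.List.pyRange 0 6 1).map (fun i => 2 + 3 * i)
  else if sequence_type == 3 then
    (PySem.List.pyRange 0 7 1).map (fun i => 30 - 10 * i)
  else if sequence_type == 4 then
    (PySem.List.pyRange 0 6 1).map (fun i => 15 + 8 * i)
  else
    []

-- ===== PORT B =====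
def pvTable : PySem.Dict Int (List Int) :=
  (((((PySem.Dict.empty).insert 1 [1, 3, 5, 7, 9, 11, 13, 15]).insert 2
      [2, 5, 8, 11, 14, 17]).insert 3
      [30, 20, 10, 0, -10, -20, -30]).insert 4
      [15, 23, 31, 39, 47, 55])

def calculate_sequence_alt (sequence_type : Int) : List Int :=
  (pvTable.getD sequence_type []).map id  -- list(...) copy

-- ===== PRECONDITION & SPEC =====
def Spec_calculate_sequence (sequence_type : Int) (out : List Int) : Prop := out = calculate_sequence_alt sequence_type
instance (sequence_type : Int) (out : List Int) : Decidable (Spec_calculate_sequence sequence_type out) := by unfold Spec_calculate_sequence; infer_instance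

-- ===== CLAIM (what is proved, stated in full; the proofs are below) =====
def Claim_equal_calculate_sequence : Prop := ∀ (sequence_type : Int), Dom_calculate_sequence sequence_type → Spec_calculate_sequence sequence_type (calculate_sequence sequence_type)

-- ===== LEMMAS AND PROOFS =====

-- ===== VERDICT (by name: the statement is the Claim_ definition above) =====
theorem calculate_sequence_spec : Claim_equal_calculate_sequence := by
  intro t _
  unfold Spec_calculate_sequence calculate_sequence calculate_sequence_alt pvTable
  by_cases h1 : t = 1
  · subst h1; decide
  · by_cases h2 : t = 2
    · subst h2; decide
    · by_cases h3 : t = 3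
      · subst h3; decide
      · by_cases h4 : t = 4
        · subst h4; decide
        · have n1 : ((1 : Int) == t) = false := by simpa using Ne.symm h1
          have n2 : ((2 : Int) == t) = false := by simpa using Ne.symm h2
          have n3 : ((3 : Int) == t) = false := by simpa using Ne.symm h3
          have n4 : ((4 : Int) == t) = false := by simpa using Ne.symm h4
          simp [PySem.Dict.getD, PySem.Dict.get?, PySem.Dict.insert, PySem.Dict.empty, List.find?, n1, n2, n3, n4, h1, h2, h3, h4]
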